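-- pv_equiv track=rewrite | github.com/supersciencegrl/AoC | 2025/day05.py | fresh_ingredients
-- ===== SOURCE A (Python) =====
-- def fresh_ingredients(fresh_ranges: list[tuple[int, int]]) -> int:
--     """
--     Count unique integers covered by inclusive ranges.
--
--     Merges overlapping or contiguous ranges, then sums the lengths of the merged
--     intervals to compute how many distinct integers are covered.
--
--     Args:
--         fresh_ranges (list[tuple[int, int]]): List of inclusive (start, end)
--             integer ranges, which should follow start <= end ordering.
--
--     Returns:
--         int: The total number of unique integers covered by the provided ranges.
--
--     Raises:
--         IndexError: If fresh_ranges is empty (accesses sorted_ingredients[0]).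
--             Provide a non-empty list or add a guard before calling.
--
--     Notes:
--         - Time complexity: O(n log n) for sorting + O(n) for merging; memory
--         usage is O(n) for the merged list.
--         - Making a big set was much more inefficient.
--     """
--     # Sort ranges
--     sorted_ingredients = sorted(fresh_ranges, key = lambda x: (x[0], x[1]))
--
--     # Merge overlapping or touching ranges
--     merged = []
--     this_start, this_end = sorted_ingredients[0]
--     for start, end in sorted_ingredients[1:]:
--         if start <= this_end + 1: # The ranges overlap or touch
--             this_end = max(this_end, end)
--         else:
--             merged.append((this_start, this_end))
--             this_start, this_end = start, end
--     merged.append((this_start, this_end))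
--
--     num_ingredients = sum(end - start + 1 for start, end in merged)
--
--     return num_ingredients
-- ===== SOURCE B (Python) =====
-- def fresh_ingredients(fresh_ranges: list[tuple[int, int]]) -> int:
--     """Reverse-order insertion: walk the ranges in DESCENDING sorted order and
--     insert each at the front of a list of already-disjoint merged blocks,
--     popping (absorbing) every block it overlaps or touches; finally sum the
--     block lengths.  No this_start/this_end sweep state is carried."""
--     blocks = []  # disjoint (start, end) blocks, ascending by start
--     for start, end in reversed(sorted(fresh_ranges)):
--         m = end
--         while blocks and blocks[0][0] <= m + 1:
--             m = max(m, blocks.pop(0)[1])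
--         blocks.insert(0, (start, m))
--     return sum(e - s + 1 for s, e in blocks)
-- ===== Notes on version B (the rewrite author's own statement) =====
-- stated objective: alternative
-- what changed: Replaces A's forward sweep that carries this_start/this_end state and appends finished intervals to a merged list by a reverse-order construction: ranges are processed in descending sorted order and each is inserted at the front of a list of disjoint blocks, with an inner while loop popping and absorbing every block it overlaps or touches; the block lengths are then summed.
import Mathlib
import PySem

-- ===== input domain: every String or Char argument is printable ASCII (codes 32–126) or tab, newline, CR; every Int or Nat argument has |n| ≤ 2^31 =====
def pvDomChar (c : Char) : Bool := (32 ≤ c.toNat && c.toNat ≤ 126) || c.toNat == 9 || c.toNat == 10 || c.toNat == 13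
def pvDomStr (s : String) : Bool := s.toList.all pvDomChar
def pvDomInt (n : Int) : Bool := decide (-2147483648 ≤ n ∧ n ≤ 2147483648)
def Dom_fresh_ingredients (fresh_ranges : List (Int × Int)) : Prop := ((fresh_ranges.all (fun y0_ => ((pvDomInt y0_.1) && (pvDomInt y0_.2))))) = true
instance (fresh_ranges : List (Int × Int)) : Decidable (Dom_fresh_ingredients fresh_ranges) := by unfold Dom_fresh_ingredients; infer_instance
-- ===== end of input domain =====

-- B replaces A's forward merge-sweep (carried this_start/this_end state, merged list appended left-to-right)
-- by reverse-order front insertion with cascading absorption of overlapping blocks (alternative decomposition,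
-- same asymptotic cost); Pre_ excludes the empty list, on which A raises IndexError (B returns 0 there).

-- ===== PORT A =====
-- literal transliteration of A: sort by (x[0], x[1]), take sorted[0], loop over sorted[1:]
-- appending finished intervals to `merged`, then sum (end - start + 1) over merged.
def fresh_ingredients (fresh_ranges : List (Int × Int)) : Int :=
  let sorted_ingredients := PySem.List.sorted2 fresh_ranges (fun x => x.1) (fun x => x.2)
  let first := PySem.List.pyGetD sorted_ingredients 0 (0, 0)   -- sorted_ingredients[0]; in range under Pre_
  let st := (PySem.List.slice sorted_ingredients (some 1) none).foldl
    (fun (acc : List (Int × Int) × Int × Int) se =>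
      if se.1 ≤ acc.2.2 + 1 then (acc.1, acc.2.1, max acc.2.2 se.2)
      else (acc.1 ++ [(acc.2.1, acc.2.2)], se.1, se.2))
    ([], first.1, first.2)
  let merged := st.1 ++ [(st.2.1, st.2.2)]
  (merged.map (fun p => p.2 - p.1 + 1)).sum

-- ===== PORT B =====
-- B's inner `while blocks and blocks[0][0] <= m + 1: m = max(m, blocks.pop(0)[1])`,
-- returning the final m together with the blocks left unpopped.
def pvAbsorb (m : Int) : List (Int × Int) → Int × List (Int × Int)
  | [] => (m, [])
  | (h, k) :: t => if h ≤ m + 1 then pvAbsorb (max m k) t else (m, (h, k) :: t)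

-- reversed(sorted(fresh_ranges)) = .reverse of the ascending sort; the for-loop is the foldl,
-- each step runs the while-loop (pvAbsorb) then blocks.insert(0, (start, m)); finally the sum.
def fresh_ingredients_alt (fresh_ranges : List (Int × Int)) : Int :=
  let ordered := (PySem.List.sorted2 fresh_ranges (fun x => x.1) (fun x => x.2)).reverse
  let blocks := ordered.foldl
    (fun (blocks : List (Int × Int)) se =>
      let r := pvAbsorb se.2 blocks
      (se.1, r.1) :: r.2) []
  (blocks.map (fun p => p.2 - p.1 + 1)).sum

-- ===== PRECONDITION & SPEC =====
-- Pre_ excludes exactly the empty list, on which A raises IndexError.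
def Pre_fresh_ingredients (fresh_ranges : List (Int × Int)) : Prop := fresh_ranges ≠ []
instance (fresh_ranges : List (Int × Int)) : Decidable (Pre_fresh_ingredients fresh_ranges) := by unfold Pre_fresh_ingredients; infer_instance
def pvWitness_fresh_ingredients : (List (Int × Int)) := [(1, 3), (7, 7)]

def Spec_fresh_ingredients (fresh_ranges : List (Int × Int)) (out : Int) : Prop := out = fresh_ingredients_alt fresh_ranges
instance (fresh_ranges : List (Int × Int)) (out : Int) : Decidable (Spec_fresh_ingredients fresh_ranges out) := by unfold Spec_fresh_ingredients; infer_instance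

-- ===== CLAIM (what is proved, stated in full; the proofs are below) =====
def Claim_equal_fresh_ingredients : Prop := ∀ (fresh_ranges : List (Int × Int)), Dom_fresh_ingredients fresh_ranges → Pre_fresh_ingredients fresh_ranges → Spec_fresh_ingredients fresh_ranges (fresh_ingredients fresh_ranges)

-- ===== LEMMAS AND PROOFS =====

-- A's loop body, named
def pvStepA (acc : List (Int × Int) × Int × Int) (se : Int × Int) : List (Int × Int) × Int × Int :=
  if se.1 ≤ acc.2.2 + 1 then (acc.1, acc.2.1, max acc.2.2 se.2)
  else (acc.1 ++ [(acc.2.1, acc.2.2)], se.1, se.2)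

-- recursive characterisation of A's merged-blocks list
def pvGoA (lo hi : Int) : List (Int × Int) → List (Int × Int)
  | [] => [(lo, hi)]
  | (s, e) :: t => if s ≤ hi + 1 then pvGoA lo (max hi e) t else (lo, hi) :: pvGoA s e t

-- recursive characterisation of B's blocks list (B's foldl over the reversed list = this foldr)
def pvInsAll : List (Int × Int) → List (Int × Int)
  | [] => []
  | x :: t =>
    let r := pvAbsorb x.2 (pvInsAll t)
    (x.1, r.1) :: r.2

theorem pvGoA_foldA (t : List (Int × Int)) : ∀ (merged : List (Int × Int)) (lo hi : Int),
    (t.foldl pvStepA (merged, lo, hi)).1 ++ [((t.foldl pvStepA (merged, lo, hi)).2.1, (t.foldl pvStepA (merged, lo, hi)).2.2)]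
      = merged ++ pvGoA lo hi t := by
  induction t with
  | nil => intro merged lo hi; simp [pvGoA]
  | cons se t ih =>
    intro merged lo hi
    obtain ⟨s, e⟩ := se
    by_cases h : s ≤ hi + 1
    · simp only [List.foldl_cons, pvStepA, if_pos h, pvGoA, ih]
    · simp only [List.foldl_cons, pvStepA, if_neg h, pvGoA, ih, List.append_assoc,
        List.singleton_append]

theorem pvInsAll_foldB (l : List (Int × Int)) :
    l.reverse.foldl
      (fun (blocks : List (Int × Int)) se =>
        let r := pvAbsorb se.2 blocks
        (se.1, r.1) :: r.2) [] = pvInsAll l := by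
  rw [List.foldl_reverse]
  induction l with
  | nil => rfl
  | cons x t ih => simp only [List.foldr_cons, ih, pvInsAll]

-- absorbing with e, then continuing from max m (result) = absorbing with max m e in one go
theorem pvAbsorb_absorb (B : List (Int × Int)) : ∀ (m e : Int),
    pvAbsorb (max m (pvAbsorb e B).1) (pvAbsorb e B).2 = pvAbsorb (max m e) B := by
  induction B with
  | nil => intro m e; simp [pvAbsorb]
  | cons hk t ih =>
    intro m e
    obtain ⟨h, k⟩ := hk
    by_cases hc : h ≤ e + 1
    · have hc2 : h ≤ max m e + 1 := le_trans hc (by simp)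
      simp only [pvAbsorb, if_pos hc, if_pos hc2, ih, max_assoc]
    · simp only [pvAbsorb, if_neg hc]

-- main lemma: on a list with nondecreasing starts, B's cascading insertion builds exactly A's merged blocks
theorem pvInsAll_eq_goA (t : List (Int × Int)) : ∀ (x : Int × Int),
    (x :: t).Pairwise (fun a b => a.1 ≤ b.1) → pvInsAll (x :: t) = pvGoA x.1 x.2 t := by
  induction t with
  | nil => intro x _; simp [pvInsAll, pvAbsorb, pvGoA]
  | cons y t' ih =>
    intro x hp
    have hxy : x.1 ≤ y.1 := (List.pairwise_cons.mp hp).1 y (List.mem_cons_self)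
    have hyt : (y :: t').Pairwise (fun a b => a.1 ≤ b.1) := (List.pairwise_cons.mp hp).2
    have hIHy := ih y hyt
    by_cases hc : y.1 ≤ x.2 + 1
    · -- merge case
      have hx't : ((x.1, max x.2 y.2) :: t').Pairwise (fun a b => a.1 ≤ b.1) := by
        refine List.pairwise_cons.mpr ⟨?_, (List.pairwise_cons.mp hyt).2⟩
        intro z hz
        exact le_trans hxy ((List.pairwise_cons.mp hyt).1 z hz)
      have hIHx := ih (x.1, max x.2 y.2) hx't
      show (let r := pvAbsorb x.2 (pvInsAll (y :: t')); (x.1, r.1) :: r.2) = _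
      simp only [pvInsAll, pvGoA, if_pos hc]
      simp only [pvInsAll] at hIHx
      rw [← hIHx]
      simp only [pvAbsorb, if_pos hc, pvAbsorb_absorb]
    · -- break case
      show (let r := pvAbsorb x.2 (pvInsAll (y :: t')); (x.1, r.1) :: r.2) = _
      simp only [pvInsAll, pvGoA, if_neg hc]
      simp only [pvAbsorb, if_neg hc]
      simp only [pvInsAll] at hIHy
      rw [hIHy]

-- insertion sort by the lexicographic `before` yields nondecreasing firsts
def pvBefore (a b : Int × Int) : Bool :=
  decide (a.1 < b.1) || (!decide (b.1 < a.1) && decide (a.2 < b.2))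

theorem pvPairwise_insertBy (x : Int × Int) (l : List (Int × Int))
    (hl : l.Pairwise (fun a b => a.1 ≤ b.1)) :
    (PySem.List.insertBy pvBefore x l).Pairwise (fun a b => a.1 ≤ b.1) := by
  induction l with
  | nil => simp [PySem.List.insertBy]
  | cons y ys ih =>
    obtain ⟨hy, hys⟩ := List.pairwise_cons.mp hl
    by_cases hb : pvBefore x y = true
    · have hxy : x.1 ≤ y.1 := by
        simp only [pvBefore, Bool.or_eq_true, decide_eq_true_eq, Bool.and_eq_true,
          Bool.not_eq_true', decide_eq_false_iff_not] at hb
        rcases hb with h | ⟨h, _⟩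
        · exact le_of_lt h
        · exact le_of_not_gt h
      show (PySem.List.insertBy pvBefore x (y :: ys)).Pairwise _
      simp only [PySem.List.insertBy, if_pos hb]
      refine List.pairwise_cons.mpr ⟨?_, hl⟩
      intro z hz
      rcases List.mem_cons.mp hz with rfl | hz'
      · exact hxy
      · exact le_trans hxy (hy z hz')
    · have hyx : y.1 ≤ x.1 := by
        simp only [pvBefore, Bool.or_eq_true, decide_eq_true_eq, Bool.and_eq_true,
          Bool.not_eq_true', decide_eq_false_iff_not] at hb
        exact le_of_not_gt (fun h => hb (Or.inl h))
      show (PySem.List.insertBy pvBefore x (y :: ys)).Pairwise _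
      simp only [PySem.List.insertBy, if_neg hb]
      refine List.pairwise_cons.mpr ⟨?_, ih hys⟩
      intro z hz
      rcases (PySem.List.mem_insertBy pvBefore x z ys).mp hz with rfl | hz'
      · exact hyx
      · exact hy z hz'

theorem pvSorted2_pairwise (l : List (Int × Int)) :
    (PySem.List.sorted2 l (fun x => x.1) (fun x => x.2)).Pairwise (fun a b => a.1 ≤ b.1) := by
  show (l.foldl (fun acc x => PySem.List.insertBy pvBefore x acc) []).Pairwise _
  have : ∀ (l : List (Int × Int)) (acc : List (Int × Int)),
      acc.Pairwise (fun a b => a.1 ≤ b.1) →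
      (l.foldl (fun acc x => PySem.List.insertBy pvBefore x acc) acc).Pairwise
        (fun (a b : Int × Int) => a.1 ≤ b.1) := by
    intro l
    induction l with
    | nil => intro acc h; exact h
    | cons x t ih =>
      intro acc h
      exact ih _ (pvPairwise_insertBy x acc h)
  exact this l [] List.Pairwise.nil

theorem pv_nonempty_eq (l : List (Int × Int)) (h : l ≠ []) :
    fresh_ingredients l = fresh_ingredients_alt l := by
  obtain ⟨x, s, hs⟩ : ∃ x s, PySem.List.sorted2 l (fun x => x.1) (fun x => x.2) = x :: s := by
    have hp := PySem.List.sorted2_perm l (fun x => x.1) (fun x => x.2) false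
    cases hsort : PySem.List.sorted2 l (fun x => x.1) (fun x => x.2) with
    | nil => rw [hsort] at hp; exact absurd hp.symm.eq_nil h
    | cons x s => exact ⟨x, s, rfl⟩
  have hpw : (x :: s).Pairwise (fun a b => a.1 ≤ b.1) := by
    have := pvSorted2_pairwise l
    rwa [hs] at this
  unfold fresh_ingredients fresh_ingredients_alt
  rw [hs]
  simp only [PySem.List.slice_from_one, List.tail_cons, PySem.List.pyGetD_zero_cons]
  rw [pvInsAll_foldB (x :: s)]
  rw [pvInsAll_eq_goA s x hpw]
  have hA := pvGoA_foldA s [] x.1 x.2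
  simp only [List.nil_append] at hA
  show ((((s.foldl pvStepA ([], x.1, x.2)).1 ++ [((s.foldl pvStepA ([], x.1, x.2)).2.1, (s.foldl pvStepA ([], x.1, x.2)).2.2)])).map (fun p => p.2 - p.1 + 1)).sum = _
  rw [hA]

-- ===== VERDICT (by name: the statement is the Claim_ definition above) =====
theorem fresh_ingredients_spec : Claim_equal_fresh_ingredients := by
  intro l _ hpre
  unfold Spec_fresh_ingredients
  exact pv_nonempty_eq l hpre
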